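-- pv_equiv track=rewrite | github.com/bitwisecook/tcl-lsp | core/refactoring/_extract_datagroup.py | _reindent_body
-- ===== SOURCE A (Python) =====
-- def _reindent_body(body: str, target_indent: str) -> str:
--     text = body.strip()
--     if text.startswith("{") and text.endswith("}"):
--         text = text[1:-1]
--     body_lines = text.split("\n")
--     non_empty = [ln for ln in body_lines if ln.strip()]
--     if not non_empty:
--         return f"{target_indent}# empty"
--     min_indent = min(len(ln) - len(ln.lstrip()) for ln in non_empty)
--     result_lines = []
--     for ln in body_lines:
--         if ln.strip():
--             result_lines.append(f"{target_indent}{ln[min_indent:]}")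
--         elif result_lines:
--             result_lines.append("")
--     return "\n".join(result_lines)
-- ===== SOURCE B (Python) =====
-- def _reindent_body(body: str, target_indent: str) -> str:
--     text = body.strip()
--     if text.startswith("{") and text.endswith("}"):
--         text = text[1:-1]
--     body_lines = text.split("\n")
--     pairs = [(i, ln) for i, ln in enumerate(body_lines) if ln.strip()]
--     if not pairs:
--         return f"{target_indent}# empty"
--     min_indent = min(len(ln) - len(ln.lstrip()) for _, ln in pairs)
--     first_i, first_ln = pairs[0]
--     out = f"{target_indent}{first_ln[min_indent:]}"
--     last = first_i
--     for i, ln in pairs[1:]: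
--         out += "\n" * (i - last) + f"{target_indent}{ln[min_indent:]}"
--         last = i
--     out += "\n" * (len(body_lines) - 1 - last)
--     return out
-- ===== Notes on version B (the rewrite author's own statement) =====
-- stated objective: alternative
-- what changed: A builds a result_lines list with a stateful per-line branch (blank lines appended as '' only once content exists) and joins it; B never builds a line list: it collects the (index, line) pairs of non-blank lines and concatenates their reindented texts directly, emitting each blank run as a newline run computed from index gaps (plus a trailing run), which makes the skip-leading-blanks behaviour fall out of the arithmetic.
import Mathlib
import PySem

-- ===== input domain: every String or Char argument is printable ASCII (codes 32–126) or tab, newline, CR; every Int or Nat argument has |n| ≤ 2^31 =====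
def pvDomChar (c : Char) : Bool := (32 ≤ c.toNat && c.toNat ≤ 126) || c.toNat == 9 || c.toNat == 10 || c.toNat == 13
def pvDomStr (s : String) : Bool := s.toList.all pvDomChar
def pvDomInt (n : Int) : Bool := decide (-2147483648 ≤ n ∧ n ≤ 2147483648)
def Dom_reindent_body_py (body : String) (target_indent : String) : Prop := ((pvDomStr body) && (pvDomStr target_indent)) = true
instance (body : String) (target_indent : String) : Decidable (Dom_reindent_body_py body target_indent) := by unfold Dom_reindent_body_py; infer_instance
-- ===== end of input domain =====

-- B replaces A's stateful result_lines accumulation (blank → '' only once output exists, then join)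
-- by concatenating the non-blank lines' reindented texts directly, with blank runs emitted as
-- newline runs computed from the non-blank lines' index gaps; objective: alternative.

-- ===== PORT A =====
-- body.strip(), brace-strip, split("\n")  (shared preprocessing, transcribed once per port)
def pvA_lines (body : String) : List (List Char) :=
  let text0 := PySem.Chars.strip body.toList
  let text := if PySem.Chars.startswith text0 "{".toList && PySem.Chars.endswith text0 "}".toList
              then PySem.List.slice text0 (some 1) (some (-1)) else text0
  PySem.Chars.splitOn text "\n".toList

-- min(len(ln) - len(ln.lstrip()) for ln in non_empty)
def pvA_minIndent (nonEmpty : List (List Char)) : Int :=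
  ((nonEmpty.map (fun ln => (PySem.Chars.len ln : Int) - PySem.Chars.len (PySem.Chars.lstrip ln))).min?).getD 0

-- A's result_lines loop: content lines appended; "" appended for a blank line only if result_lines ≠ []
def pvA_loop (ti : List Char) (mi : Int) (L : List (List Char)) : List (List Char) :=
  L.foldl (fun acc ln =>
    if !(PySem.Chars.strip ln).isEmpty then acc ++ [ti ++ PySem.List.slice ln (some mi) none]
    else if !acc.isEmpty then acc ++ [([] : List Char)]
    else acc) []

def reindent_body_py (body : String) (target_indent : String) : String :=
  let bodyLines := pvA_lines body
  let nonEmpty := bodyLines.filter (fun ln => !(PySem.Chars.strip ln).isEmpty)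
  if nonEmpty.isEmpty then
    String.ofList (target_indent.toList ++ "# empty".toList)
  else
    String.ofList (PySem.Chars.join "\n".toList
      (pvA_loop target_indent.toList (pvA_minIndent nonEmpty) bodyLines))

-- ===== PORT B =====
def pvB_lines (body : String) : List (List Char) :=
  let text0 := PySem.Chars.strip body.toList
  let text := if PySem.Chars.startswith text0 "{".toList && PySem.Chars.endswith text0 "}".toList
              then PySem.List.slice text0 (some 1) (some (-1)) else text0
  PySem.Chars.splitOn text "\n".toList

-- pairs = [(i, ln) for i, ln in enumerate(body_lines) if ln.strip()]
def pvB_pairs (L : List (List Char)) : List (Int × List Char) :=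
  (PySem.List.enumerate L).filter (fun p => !(PySem.Chars.strip p.2).isEmpty)

def pvB_minIndent (pairs : List (Int × List Char)) : Int :=
  ((pairs.map (fun p => (PySem.Chars.len p.2 : Int) - PySem.Chars.len (PySem.Chars.lstrip p.2))).min?).getD 0

-- the for-loop over pairs[1:]: out += "\n" * (i - last) + target_indent + ln[min_indent:]; last = i
def pvB_fold (ti : List Char) (mi : Int) (rest : List (Int × List Char)) (init : List Char × Int) : List Char × Int :=
  rest.foldl (fun acc p =>
    (acc.1 ++ List.replicate (p.1 - acc.2).toNat '\n' ++ ti ++ PySem.List.slice p.2 (some mi) none, p.1)) init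

def reindent_body_py_alt (body : String) (target_indent : String) : String :=
  let bodyLines := pvB_lines body
  let pairs := pvB_pairs bodyLines
  match pairs with
  | [] => String.ofList (target_indent.toList ++ "# empty".toList)
  | p0 :: rest =>
    let mi := pvB_minIndent (p0 :: rest)
    let init := target_indent.toList ++ PySem.List.slice p0.2 (some mi) none
    let res := pvB_fold target_indent.toList mi rest (init, p0.1)
    String.ofList (res.1 ++ List.replicate ((bodyLines.length : Int) - 1 - res.2).toNat '\n')

-- ===== PRECONDITION & SPEC =====
def Spec_reindent_body_py (body : String) (target_indent : String) (out : String) : Prop := out = reindent_body_py_alt body target_indent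
instance (body : String) (target_indent : String) (out : String) : Decidable (Spec_reindent_body_py body target_indent out) := by unfold Spec_reindent_body_py; infer_instance

-- ===== CLAIM (what is proved, stated in full; the proofs are below) =====
def Claim_equal_reindent_body_py : Prop := ∀ (body : String) (target_indent : String), Dom_reindent_body_py body target_indent → Spec_reindent_body_py body target_indent (reindent_body_py body target_indent)

-- ===== LEMMAS AND PROOFS =====

-- once A's accumulator is non-empty, the loop appends one line per input line
theorem pv_foldl_from_ne_nil {a b : Type} (p : a → Bool) (f : a → b) (blank : b)
    (L : List a) (acc : List b) (hacc : acc ≠ []) :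
    L.foldl (fun acc ln => if p ln then acc ++ [f ln]
                           else if !acc.isEmpty then acc ++ [blank] else acc) acc
      = acc ++ L.map (fun ln => if p ln then f ln else blank) := by
  induction L generalizing acc with
  | nil => simp
  | cons x xs ih =>
    by_cases hx : p x
    · simp only [List.foldl_cons, hx, if_true, List.map_cons]
      rw [ih _ (by simp)]
      simp
    · simp only [List.foldl_cons, hx, List.map_cons,
        List.isEmpty_eq_false_iff.mpr hacc, Bool.not_false, if_true]
      rw [ih _ (by simp)]
      simp

-- A's loop from the empty accumulator = skip to the first non-blank, then one map
theorem pv_foldl_eq_drop_map {a b : Type} (p : a → Bool) (f : a → b) (blank : b)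
    (L : List a) :
    L.foldl (fun acc ln => if p ln then acc ++ [f ln]
                           else if !acc.isEmpty then acc ++ [blank] else acc) []
      = (L.drop (L.findIdx p)).map (fun ln => if p ln then f ln else blank) := by
  induction L with
  | nil => simp
  | cons x xs ih =>
    by_cases hx : p x
    · simp only [List.foldl_cons, hx, if_true, List.nil_append, List.findIdx_cons,
        cond_true, List.drop_zero, List.map_cons, if_true]
      exact pv_foldl_from_ne_nil p f blank xs [f x] (by simp)
    · simp only [List.foldl_cons, hx, if_false, List.isEmpty_nil, Bool.not_true,
        Bool.false_eq_true, List.findIdx_cons, cond_false, List.drop_succ_cons]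
      exact ih

-- "\n".join(x :: xs) expanded as a flatMap
theorem pv_joinNl (x : List Char) (xs : List (List Char)) :
    PySem.Chars.join "\n".toList (x :: xs) = x ++ xs.flatMap (fun y => '\n' :: y) := by
  induction xs generalizing x with
  | nil => simp [PySem.Chars.join_singleton]
  | cons y ys ih =>
    rw [PySem.Chars.join_cons_cons, ih y]
    simp

-- the second components of the filtered enumeration are the filtered lines
theorem pv_map_snd_filter_enumerate (L : List (List Char)) (s : Int) :
    (((PySem.List.enumerate L s).filter
        (fun p => !(PySem.Chars.strip p.2).isEmpty)).map (fun p => p.2))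
      = L.filter (fun ln => !(PySem.Chars.strip ln).isEmpty) := by
  induction L generalizing s with
  | nil => simp [PySem.List.enumerate]
  | cons x xs ih =>
    rw [PySem.List.enumerate_cons]
    by_cases hx : (!(PySem.Chars.strip x).isEmpty) = true
    · simp only [List.filter_cons, hx, if_true, List.map_cons, ih]
    · simp only [List.filter_cons] at *
      simp only [hx, if_false, Bool.false_eq_true, ih]

-- B's min over pairs is A's min over the non-empty lines
theorem pv_minIndent_eq (ps : List (Int × List Char)) :
    pvB_minIndent ps = pvA_minIndent (ps.map (fun p => p.2)) := by
  unfold pvB_minIndent pvA_minIndent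
  rw [List.map_map]
  rfl

-- one step of B's gap fold
theorem pvB_fold_cons (ti : List Char) (mi : Int) (i : Int) (ln : List Char)
    (zs : List (Int × List Char)) (s : List Char) (last : Int) :
    pvB_fold ti mi ((i, ln) :: zs) (s, last)
      = pvB_fold ti mi zs
          (s ++ List.replicate (i - last).toNat '\n' ++ ti ++ PySem.List.slice ln (some mi) none, i) := rfl

-- the core invariant of B's gap fold: fold over the filtered enumeration of T (indices from j+1),
-- plus the final newline run, equals the pending run plus one flatMap over T
theorem pv_fold_gap (ti : List Char) (mi : Int) (T : List (List Char))
    (j last : Int) (s : List Char) (hlj : last ≤ j) :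
    (pvB_fold ti mi ((PySem.List.enumerate T (j + 1)).filter
        (fun p => !(PySem.Chars.strip p.2).isEmpty)) (s, last)).1
      ++ List.replicate (((j + (T.length : Int)) -
          (pvB_fold ti mi ((PySem.List.enumerate T (j + 1)).filter
            (fun p => !(PySem.Chars.strip p.2).isEmpty)) (s, last)).2).toNat) '\n'
    = s ++ List.replicate ((j - last).toNat) '\n'
        ++ T.flatMap (fun ln => '\n' ::
            (if !(PySem.Chars.strip ln).isEmpty then ti ++ PySem.List.slice ln (some mi) none
             else [])) := by
  induction T generalizing j last s with
  | nil =>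
    simp [PySem.List.enumerate, pvB_fold]
  | cons ln T' ih =>
    have hlen : (((ln :: T').length) : Int) = (T'.length : Int) + 1 := by
      simp only [List.length_cons]
      push_cast
      ring
    rw [PySem.List.enumerate_cons, hlen]
    have hrep : List.replicate ((j + 1 - last).toNat) '\n'
        = List.replicate ((j - last).toNat) '\n' ++ ['\n'] := by
      rw [show ((j : Int) + 1 - last).toNat = (j - last).toNat + 1 by omega]
      rw [List.replicate_succ']
    by_cases hx : (!(PySem.Chars.strip ln).isEmpty) = true
    · have hfilt : List.filter (fun p : Int × List Char => !(PySem.Chars.strip p.2).isEmpty)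
          ((j + 1, ln) :: PySem.List.enumerate T' (j + 1 + 1))
          = (j + 1, ln) :: List.filter (fun p : Int × List Char => !(PySem.Chars.strip p.2).isEmpty)
              (PySem.List.enumerate T' (j + 1 + 1)) := by
        rw [List.filter_cons]
        simp [hx]
      rw [hfilt, pvB_fold_cons]
      rw [show ((j : Int) + ((T'.length : Int) + 1)) = (j + 1) + (T'.length : Int) by ring]
      rw [ih (j + 1) (j + 1) _ (le_refl _)]
      have hne : ¬ PySem.Chars.strip ln = [] := by simpa using hx
      simp [hrep, hne]
    · have hfilt : List.filter (fun p : Int × List Char => !(PySem.Chars.strip p.2).isEmpty)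
          ((j + 1, ln) :: PySem.List.enumerate T' (j + 1 + 1))
          = List.filter (fun p : Int × List Char => !(PySem.Chars.strip p.2).isEmpty)
              (PySem.List.enumerate T' (j + 1 + 1)) := by
        rw [List.filter_cons]
        simp at hx
        simp [hx]
      rw [hfilt]
      rw [show ((j : Int) + ((T'.length : Int) + 1)) = (j + 1) + (T'.length : Int) by ring]
      rw [ih (j + 1) last _ (by omega)]
      have heq : PySem.Chars.strip ln = [] := by simpa using hx
      simp [hrep, heq]

-- decomposing B's pairs at the first non-blank line
theorem pv_pairs_decomp (L : List (List Char)) (f : Nat) (hf : f < L.length)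
    (hp : (!(PySem.Chars.strip L[f]).isEmpty) = true)
    (hblank : ∀ k (hk : k < f), (!(PySem.Chars.strip (L[k]'(by omega))).isEmpty) = false) :
    pvB_pairs L = ((f : Int), L[f]) ::
      (PySem.List.enumerate (L.drop (f + 1)) ((f : Int) + 1)).filter
        (fun p => !(PySem.Chars.strip p.2).isEmpty) := by
  unfold pvB_pairs
  conv_lhs => rw [show L = L.take f ++ L.drop f from (List.take_append_drop f L).symm]
  rw [PySem.List.enumerate_append, List.filter_append]
  have hlen : (L.take f).length = f := List.length_take_of_le (by omega)
  have h0 : ((L.take f).length : Int) = (f : Int) := by rw [hlen]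
  have hnil : ((PySem.List.enumerate (L.take f) 0).filter
      (fun p => !(PySem.Chars.strip p.2).isEmpty)) = [] := by
    rw [List.filter_eq_nil_iff]
    intro p hp'
    rcases (PySem.List.mem_enumerate_iff _ _ _).mp hp' with ⟨k, hk, rfl⟩
    rw [hlen] at hk
    have := hblank k hk
    simpa [List.getElem_take] using this
  rw [hnil, List.nil_append]
  rw [show L.drop f = L[f] :: L.drop (f + 1) from List.drop_eq_getElem_cons hf]
  rw [PySem.List.enumerate_cons]
  simp only [List.filter_cons, hp, if_true, h0, zero_add]

-- the two preprocessing pipelines coincide definitionally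
theorem pvB_lines_eq (body : String) : pvB_lines body = pvA_lines body := rfl

-- ===== VERDICT (by name: the statement is the Claim_ definition above) =====
set_option maxHeartbeats 1000000 in
theorem reindent_body_py_spec : Claim_equal_reindent_body_py := by
  intro body ti _
  unfold Spec_reindent_body_py
  unfold reindent_body_py reindent_body_py_alt
  rw [pvB_lines_eq]
  set L := pvA_lines body with hL
  by_cases hne : (L.filter (fun ln => !(PySem.Chars.strip ln).isEmpty)).isEmpty = true
  · have hpairs : pvB_pairs L = [] := by
      have := pv_map_snd_filter_enumerate L 0
      rw [List.isEmpty_iff] at hne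
      rw [hne] at this
      have := List.map_eq_nil_iff.mp this
      simpa [pvB_pairs] using this
    simp only [hne, if_true, hpairs]
  · -- non-empty case
    have hex : ∃ x ∈ L, (!(PySem.Chars.strip x).isEmpty) = true := by
      rw [List.isEmpty_iff] at hne
      rcases List.exists_mem_of_ne_nil _ hne with ⟨x, hx⟩
      exact ⟨x, (List.mem_filter.mp hx).1, (List.mem_filter.mp hx).2⟩
    set p : List Char → Bool := fun ln => !(PySem.Chars.strip ln).isEmpty with hpdef
    have hf : L.findIdx p < L.length := List.findIdx_lt_length.mpr hex
    set f := L.findIdx p with hfdef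
    have hp : p L[f] = true := List.findIdx_getElem (w := hf)
    have hblank : ∀ k (hk : k < f), p (L[k]'(by omega)) = false := fun k hk =>
      List.not_of_lt_findIdx hk
    have hdecomp := pv_pairs_decomp L f hf hp hblank
    simp only [hdecomp]
    set T := L.drop (f + 1) with hT
    set mi := pvB_minIndent (((f : Int), L[f]) ::
      (PySem.List.enumerate T ((f : Int) + 1)).filter (fun q => !(PySem.Chars.strip q.2).isEmpty)) with hmi
    have hmaps : List.map (fun q => q.2) (pvB_pairs L) = List.filter p L :=
      pv_map_snd_filter_enumerate L 0
    have hmiA : pvA_minIndent (L.filter p) = mi := by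
      rw [hmi, pv_minIndent_eq]
      congr 1
      rw [← hdecomp]
      exact hmaps.symm
    -- A side: loop = drop-then-map, then join as flatMap
    have hloop : pvA_loop ti.toList mi L
        = (L.drop f).map (fun ln => if p ln then ti.toList ++ PySem.List.slice ln (some mi) none else []) :=
      pv_foldl_eq_drop_map p _ _ L
    have hdropf : L.drop f = L[f] :: T := List.drop_eq_getElem_cons hf
    have hA : PySem.Chars.join "\n".toList (pvA_loop ti.toList mi L)
        = (ti.toList ++ PySem.List.slice L[f] (some mi) none)
          ++ T.flatMap (fun ln => '\n' ::
              (if !(PySem.Chars.strip ln).isEmpty then ti.toList ++ PySem.List.slice ln (some mi) none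
               else [])) := by
      rw [hloop, hdropf, List.map_cons, pv_joinNl, if_pos hp, List.flatMap_map]
    -- B side via the gap invariant
    have hgap := pv_fold_gap ti.toList mi T (f : Int) (f : Int)
      (ti.toList ++ PySem.List.slice L[f] (some mi) none) (le_refl _)
    have hcount : (((L.length : Int) - 1 -
        (pvB_fold ti.toList mi ((PySem.List.enumerate T ((f : Int) + 1)).filter
          (fun q => !(PySem.Chars.strip q.2).isEmpty))
          (ti.toList ++ PySem.List.slice L[f] (some mi) none, (f : Int))).2).toNat)
        = ((((f : Int) + (T.length : Int)) -
        (pvB_fold ti.toList mi ((PySem.List.enumerate T ((f : Int) + 1)).filter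
          (fun q => !(PySem.Chars.strip q.2).isEmpty))
          (ti.toList ++ PySem.List.slice L[f] (some mi) none, (f : Int))).2).toNat) := by
      have hTlen : (T.length : Int) = (L.length : Int) - ((f : Int) + 1) := by
        rw [hT, List.length_drop]
        omega
      omega
    have hB : (pvB_fold ti.toList mi ((PySem.List.enumerate T ((f : Int) + 1)).filter
          (fun q => !(PySem.Chars.strip q.2).isEmpty))
          (ti.toList ++ PySem.List.slice L[f] (some mi) none, (f : Int))).1
        ++ List.replicate (((L.length : Int) - 1 -
            (pvB_fold ti.toList mi ((PySem.List.enumerate T ((f : Int) + 1)).filter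
              (fun q => !(PySem.Chars.strip q.2).isEmpty))
              (ti.toList ++ PySem.List.slice L[f] (some mi) none, (f : Int))).2).toNat) '\n'
        = (ti.toList ++ PySem.List.slice L[f] (some mi) none)
          ++ T.flatMap (fun ln => '\n' ::
              (if !(PySem.Chars.strip ln).isEmpty then ti.toList ++ PySem.List.slice ln (some mi) none
               else [])) := by
      rw [hcount, hgap]
      simp
    rw [hmiA, if_neg hne]
    exact congrArg String.ofList (hA.trans hB.symm)
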